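-- pv_equiv track=rewrite | github.com/jules-jo/test-daemon | src/jules_daemon/cli/parser.py | _split_flags_and_positionals
-- ===== SOURCE A (Python) =====
-- def _split_flags_and_positionals(
--     tokens: list[str],
-- ) -> tuple[list[str], dict[str, str | None]]:
--     """Split tokens into positional args and flag key-value pairs.
--
--     Flags start with ``-`` or ``--``. A flag followed by a non-flag
--     token consumes that token as its value. Boolean flags (no value)
--     get ``None`` as their value.
--
--     Supports ``--flag=value`` syntax by splitting on the first ``=``.
--
--     Note: Tokens starting with ``-`` are always treated as flags, so
--     negative numeric values must use ``--flag=-5`` syntax.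
--
--     Args:
--         tokens: Token list (verb already removed).
--
--     Returns:
--         Tuple of (positional_tokens, flag_dict).
--         Flag keys are lowercased with leading dashes preserved.
--     """
--     positionals: list[str] = []
--     flags: dict[str, str | None] = {}
--
--     i = 0
--     while i < len(tokens):
--         token = tokens[i]
--
--         if token.startswith("-"):
--             # Handle --flag=value syntax
--             if "=" in token:
--                 key, _, value = token.partition("=")
--                 flags[key.lower()] = value
--                 i += 1
--                 continue
--
--             key = token.lower()
--             # Check if next token is a value (not a flag itself)
--             if i + 1 < len(tokens) and not tokens[i + 1].startswith("-"):
--                 flags[key] = tokens[i + 1]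
--                 i += 2
--             else:
--                 flags[key] = None
--                 i += 1
--         else:
--             positionals.append(token)
--             i += 1
--
--     return positionals, flags
-- ===== SOURCE B (Python) =====
-- def _split_flags_and_positionals(tokens):
--     positionals = []
--     flags = {}
--     pending = None  # flag key waiting for a possible value
--     for token in tokens:
--         if token.startswith("-"):
--             if pending is not None:
--                 flags[pending] = None
--                 pending = None
--             if "=" in token:
--                 key, _, value = token.partition("=")
--                 flags[key.lower()] = value
--             else:
--                 pending = token.lower()
--         elif pending is not None:
--             flags[pending] = token
--             pending = None
--         else:
--             positionals.append(token)
--     if pending is not None: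
--         flags[pending] = None
--     return positionals, flags
-- ===== Notes on version B (the rewrite author's own statement) =====
-- stated objective: simpler
-- what changed: Replaced the index/lookahead while-loop with its i+=2 skip by a single for-loop over the tokens that keeps a 'pending' flag key, flushed as None before the next flag or at the end and consumed by the next positional.
import Mathlib
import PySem

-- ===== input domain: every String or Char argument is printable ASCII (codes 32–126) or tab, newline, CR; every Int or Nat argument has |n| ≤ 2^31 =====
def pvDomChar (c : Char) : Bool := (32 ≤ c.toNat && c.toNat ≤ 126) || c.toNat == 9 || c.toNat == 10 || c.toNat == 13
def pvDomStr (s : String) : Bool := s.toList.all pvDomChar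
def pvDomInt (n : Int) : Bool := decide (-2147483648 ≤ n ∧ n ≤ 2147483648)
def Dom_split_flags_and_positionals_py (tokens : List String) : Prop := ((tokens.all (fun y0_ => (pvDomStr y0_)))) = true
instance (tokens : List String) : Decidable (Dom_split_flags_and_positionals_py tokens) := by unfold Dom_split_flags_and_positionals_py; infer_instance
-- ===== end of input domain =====

-- B replaces A's index/lookahead while-loop (i += 2 skip) by a forward pass with a 'pending' flag key: simpler, same cost.

-- ===== PORT A =====

-- token.partition("=") restricted to its use here: (part before first '=', part after). Exact for the first-'=' split.
def pvPartEq : List Char → List Char × List Char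
  | [] => ([], [])
  | c :: cs => if c = '=' then ([], cs) else
      let p := pvPartEq cs
      (c :: p.1, p.2)

-- the while-loop of A, as structural recursion on the remaining tokens (i ↦ drop i tokens; i += 2 drops two)
def pvALoop (tokens : List String) (positionals : List String) (flags : PySem.Dict String (Option String)) : List String × (List (String × Option String)) :=
  match tokens with
  | [] => (positionals, flags.items)
  | token :: rest =>
    if PySem.Str.startswith token "-" then
      if PySem.Str.isIn "=" token then
        let p := pvPartEq token.toList
        pvALoop rest positionals (flags.insert (PySem.Str.lower (String.ofList p.1)) (some (String.ofList p.2)))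
      else
        let key := PySem.Str.lower token
        match rest.head? with
        | some next =>
          if PySem.Str.startswith next "-" = false then
            pvALoop (rest.drop 1) positionals (flags.insert key (some next))
          else
            pvALoop rest positionals (flags.insert key none)
        | none => pvALoop rest positionals (flags.insert key none)
    else
      pvALoop rest (positionals ++ [token]) flags
termination_by tokens.length
decreasing_by all_goals simp

def split_flags_and_positionals_py (tokens : List String) : List String × (List (String × Option String)) :=
  pvALoop tokens [] PySem.Dict.empty

-- ===== PORT B =====

def pvBLoop (tokens : List String) (positionals : List String) (flags : PySem.Dict String (Option String)) (pending : Option String) : List String × (List (String × Option String)) :=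
  match tokens with
  | [] =>
    match pending with
    | some k => (positionals, (flags.insert k none).items)
    | none => (positionals, flags.items)
  | token :: rest =>
    if PySem.Str.startswith token "-" then
      let flags1 := match pending with
        | some k => flags.insert k none
        | none => flags
      if PySem.Str.isIn "=" token then
        let p := pvPartEq token.toList
        pvBLoop rest positionals (flags1.insert (PySem.Str.lower (String.ofList p.1)) (some (String.ofList p.2))) none
      else
        pvBLoop rest positionals flags1 (some (PySem.Str.lower token))
    else
      match pending with
      | some k => pvBLoop rest positionals (flags.insert k (some token)) none
      | none => pvBLoop rest (positionals ++ [token]) flags none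

def split_flags_and_positionals_py_alt (tokens : List String) : List String × (List (String × Option String)) :=
  pvBLoop tokens [] PySem.Dict.empty none

-- ===== PRECONDITION & SPEC =====
def Spec_split_flags_and_positionals_py (tokens : List String) (out : List String × (List (String × Option String))) : Prop := out = split_flags_and_positionals_py_alt tokens
instance (tokens : List String) (out : List String × (List (String × Option String))) : Decidable (Spec_split_flags_and_positionals_py tokens out) := by unfold Spec_split_flags_and_positionals_py; infer_instance

-- ===== CLAIM (what is proved, stated in full; the proofs are below) =====
def Claim_equal_split_flags_and_positionals_py : Prop := ∀ (tokens : List String), Dom_split_flags_and_positionals_py tokens → Spec_split_flags_and_positionals_py tokens (split_flags_and_positionals_py tokens)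

-- ===== LEMMAS AND PROOFS =====

-- flushing a pending key before a flag token equals starting that token with no pending key
theorem pvBLoop_flush (t : String) (r pos : List String) (flags : PySem.Dict String (Option String)) (k : String)
    (h : PySem.Str.startswith t "-" = true) :
    pvBLoop (t :: r) pos flags (some k) = pvBLoop (t :: r) pos (flags.insert k none) none := by
  simp only [pvBLoop, h, if_true]

theorem pvLoop_eq (n : Nat) : ∀ (tokens : List String), tokens.length ≤ n →
    ∀ (pos : List String) (flags : PySem.Dict String (Option String)),
    pvALoop tokens pos flags = pvBLoop tokens pos flags none := by
  induction n with
  | zero =>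
    intro tokens h pos flags
    have : tokens = [] := List.length_eq_zero_iff.mp (Nat.le_zero.mp h)
    subst this; simp [pvALoop, pvBLoop]
  | succ n ih =>
    intro tokens h pos flags
    match tokens with
    | [] => simp [pvALoop, pvBLoop]
    | token :: rest =>
      have hr : rest.length ≤ n := by simp at h; omega
      by_cases hs : PySem.Str.startswith token "-" = true
      · by_cases he : PySem.Str.isIn "=" token = true
        · simp only [pvALoop, pvBLoop, hs, he, if_true]
          exact ih rest hr pos _
        · have he' : PySem.Str.isIn "=" token = false := Bool.eq_false_iff.mpr he
          simp only [pvALoop, pvBLoop, hs, he', if_true, Bool.false_eq_true, if_false]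
          match rest with
          | [] => simp [pvALoop, pvBLoop]
          | next :: rest' =>
            have hr' : rest'.length ≤ n := by simp at hr; omega
            simp only [List.head?_cons, List.drop_succ_cons, List.drop_zero]
            by_cases hn : PySem.Str.startswith next "-" = true
            · simp only [hn, Bool.true_eq_false, if_false]
              rw [pvBLoop_flush next rest' pos flags _ hn]
              exact ih (next :: rest') hr pos _
            · have hn' : PySem.Str.startswith next "-" = false := Bool.eq_false_iff.mpr hn
              simp only [hn', if_true]
              rw [show pvBLoop (next :: rest') pos flags (some (PySem.Str.lower token))
                    = pvBLoop rest' pos (flags.insert (PySem.Str.lower token) (some next)) none by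
                  simp only [pvBLoop, hn', Bool.false_eq_true, if_false]]
              exact ih rest' hr' pos _
      · have hs' : PySem.Str.startswith token "-" = false := Bool.eq_false_iff.mpr hs
        simp only [pvALoop, pvBLoop, hs', Bool.false_eq_true, if_false]
        exact ih rest hr (pos ++ [token]) flags

-- ===== VERDICT (by name: the statement is the Claim_ definition above) =====
theorem split_flags_and_positionals_py_spec : Claim_equal_split_flags_and_positionals_py := by
  intro tokens _
  unfold Spec_split_flags_and_positionals_py split_flags_and_positionals_py split_flags_and_positionals_py_alt
  exact pvLoop_eq tokens.length tokens le_rfl [] PySem.Dict.empty
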